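-- pv_equiv track=rewrite | github.com/r-xue/pipeline | pipeline/hsd/tasks/common/rasterutil.py | gap_gen
-- ===== SOURCE A (Python) =====
-- from typing import Generator, List, Optional, Tuple
--
-- def gap_gen(gaplist: List[int], length: Optional[int]=None) -> Generator[Tuple[int, int], None, None]:
--     """
--     Generate range of data (start and end indices) from given gap list.
--
--     Return values, s and e, can be used to arr[s:e] to extract the data from
--     the original array, arr.
--
--     Args:
--         gaplist: list of indices indicating gap
--         length: total number of data, defaults to None
--
--     Yields:
--         start and end indices
--     """
--     n = -1 if length is None else length
--     if len(gaplist) == 0: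
--         yield 0, n
--     else:
--         yield 0, gaplist[0] + 1
--         for i, j in zip(gaplist[:-1], gaplist[1:]):
--             yield i + 1, j + 1
--         yield gaplist[-1] + 1, n
-- ===== SOURCE B (Python) =====
-- from typing import Generator, List, Optional, Tuple
--
-- def gap_gen(gaplist: List[int], length: Optional[int]=None) -> Generator[Tuple[int, int], None, None]:
--     start = 0
--     for g in gaplist:
--         yield start, g + 1
--         start = g + 1
--     yield start, (-1 if length is None else length)
-- ===== Notes on version B (the rewrite author's own statement) =====
-- stated objective: simpler
-- what changed: Replaces A's three special-cased yield sites driven by slicing and zip(gaplist[:-1], gaplist[1:]) with a single pass carrying a running start accumulator (start=0, yield (start,g+1) and advance per gap, one final yield), so no branch on the empty list and no sliced copies.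
import Mathlib
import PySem

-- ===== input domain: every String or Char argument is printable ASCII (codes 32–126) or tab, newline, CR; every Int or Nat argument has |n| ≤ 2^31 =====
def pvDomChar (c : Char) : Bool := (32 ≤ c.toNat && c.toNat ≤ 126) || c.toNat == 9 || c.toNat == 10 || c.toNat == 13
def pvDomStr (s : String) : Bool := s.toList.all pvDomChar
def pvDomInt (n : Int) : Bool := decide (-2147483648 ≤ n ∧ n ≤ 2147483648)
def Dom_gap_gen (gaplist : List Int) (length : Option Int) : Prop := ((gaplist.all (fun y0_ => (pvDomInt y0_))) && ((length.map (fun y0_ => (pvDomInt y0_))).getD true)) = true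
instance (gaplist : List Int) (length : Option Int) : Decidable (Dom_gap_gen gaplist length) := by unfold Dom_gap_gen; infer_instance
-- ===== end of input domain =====

-- B replaces A's three special-cased yield sites (slicing + zip of shifted copies) by a
-- single pass carrying a running start accumulator (objective: simpler).

-- ===== PORT A =====
-- Literal port of A: branch on empty gaplist; otherwise first pair, zipped middle pairs, last pair.
def gap_gen (gaplist : List Int) (length : Option Int) : List (Int × Int) :=
  let n : Int := match length with | none => -1 | some l => l
  match gaplist with
  | [] => [(0, n)]
  | g0 :: rest =>
      (0, g0 + 1) ::
      (((g0 :: rest).dropLast.zip (g0 :: rest).tail).map (fun ij => (ij.1 + 1, ij.2 + 1)) ++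
        [((g0 :: rest).getLast (by simp) + 1, n)])

-- ===== PORT B =====
-- Literal port of B's loop: carry the running `start`, yield (start, g+1) per gap, then the final range.
def gapGenAltGo (start : Int) (l : List Int) (n : Int) : List (Int × Int) :=
  match l with
  | [] => [(start, n)]
  | g :: gs => (start, g + 1) :: gapGenAltGo (g + 1) gs n

def gap_gen_alt (gaplist : List Int) (length : Option Int) : List (Int × Int) :=
  gapGenAltGo 0 gaplist (match length with | none => -1 | some l => l)

-- ===== PRECONDITION & SPEC =====
def Spec_gap_gen (gaplist : List Int) (length : Option Int) (out : List (Int × Int)) : Prop := out = gap_gen_alt gaplist length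
instance (gaplist : List Int) (length : Option Int) (out : List (Int × Int)) : Decidable (Spec_gap_gen gaplist length out) := by unfold Spec_gap_gen; infer_instance

-- ===== CLAIM (what is proved, stated in full; the proofs are below) =====
def Claim_equal_gap_gen : Prop := ∀ (gaplist : List Int) (length : Option Int), Dom_gap_gen gaplist length → Spec_gap_gen gaplist length (gap_gen gaplist length)

-- ===== LEMMAS AND PROOFS =====

-- A's middle-zip-plus-last-pair block equals B's accumulator loop started at g + 1.
lemma gapA_tail_eq_go (g : Int) (l : List Int) (n : Int) :
    ((g :: l).dropLast.zip l).map (fun ij => (ij.1 + 1, ij.2 + 1)) ++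
      [((g :: l).getLast (by simp) + 1, n)] = gapGenAltGo (g + 1) l n := by
  induction l generalizing g with
  | nil => simp [gapGenAltGo]
  | cons h t ih => simpa [gapGenAltGo] using ih h

-- ===== VERDICT (by name: the statement is the Claim_ definition above) =====
theorem gap_gen_spec : Claim_equal_gap_gen := by
  intro gaplist length _
  unfold Spec_gap_gen
  cases gaplist with
  | nil => cases length <;> rfl
  | cons g gs =>
      simp only [gap_gen, gap_gen_alt, List.tail_cons, gapA_tail_eq_go, gapGenAltGo]
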